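-- pv_equiv track=rewrite | github.com/ReedSein/astrbot_plugin_mnemosyne | core/tools.py | remove_system_content
-- ===== SOURCE A (Python) =====
-- def remove_system_content(
--     contents: list[dict[str, str]], contexts_memory_len: int = 0
-- ) -> list[dict[str, str]]:
--     """
--     从LLM上下文中移除较旧的系统提示 ('role'='system' 的消息)，
--     保留指定数量的最新的 system 消息，并维持整体消息顺序。
--     """
--     if not isinstance(contents, list):
--         return []
--     if contexts_memory_len < 0:
--         return contents
--
--     system_message_indices = [
--         i
--         for i, msg in enumerate(contents)
--         if isinstance(msg, dict) and msg.get("role") == "system"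
--     ]
--     indices_to_remove: set[int] = set()
--     num_system_messages = len(system_message_indices)
--
--     if num_system_messages > contexts_memory_len:
--         num_to_remove = num_system_messages - contexts_memory_len
--         indices_to_remove = set(system_message_indices[:num_to_remove])
--
--     cleaned_contents = [
--         msg for i, msg in enumerate(contents) if i not in indices_to_remove
--     ]
--
--     return cleaned_contents
-- ===== SOURCE B (Python) =====
-- def remove_system_content(
--     contents: list[dict[str, str]], contexts_memory_len: int = 0
-- ) -> list[dict[str, str]]:
--     """Keep only the newest `contexts_memory_len` system messages, preserving order."""
--     if not isinstance(contents, list):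
--         return []
--     if contexts_memory_len < 0:
--         return contents
--
--     kept = 0
--     out = []
--     for msg in reversed(contents):
--         if isinstance(msg, dict) and msg.get("role") == "system":
--             if kept < contexts_memory_len:
--                 kept += 1
--                 out.append(msg)
--         else:
--             out.append(msg)
--     out.reverse()
--     return out
-- ===== Notes on version B (the rewrite author's own statement) =====
-- stated objective: alternative
-- what changed: A single backward pass over reversed(contents) keeps every non-system message and the first contexts_memory_len system messages it meets (the newest ones), then reverses the output; no counting pass, no index list, no removal set.
import Mathlib
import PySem

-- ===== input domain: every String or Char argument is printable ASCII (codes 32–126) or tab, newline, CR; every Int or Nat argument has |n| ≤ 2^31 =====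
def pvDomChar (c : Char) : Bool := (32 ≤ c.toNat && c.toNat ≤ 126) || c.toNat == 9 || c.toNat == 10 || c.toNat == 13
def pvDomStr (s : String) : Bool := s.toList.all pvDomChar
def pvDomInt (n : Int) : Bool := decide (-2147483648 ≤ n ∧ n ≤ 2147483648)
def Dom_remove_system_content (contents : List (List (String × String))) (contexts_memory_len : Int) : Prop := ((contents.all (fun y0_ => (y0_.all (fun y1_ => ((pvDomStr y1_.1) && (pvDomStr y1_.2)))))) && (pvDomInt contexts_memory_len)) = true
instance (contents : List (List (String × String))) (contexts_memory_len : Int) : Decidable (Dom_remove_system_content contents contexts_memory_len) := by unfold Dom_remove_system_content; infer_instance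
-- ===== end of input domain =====

-- B replaces A's forward index-list/removal-set construction by one backward pass that keeps the newest N system messages and reverses (objective: alternative).


-- ===== PORT A =====
-- msg.get("role") == "system"  (isinstance(msg, dict) is always true under the type convention)
def pvIsSys (m : List (String × String)) : Bool :=
  PySem.Dict.get? (PySem.Dict.mk m) "role" == some "system"

-- the comprehension [i for i, msg in enumerate(contents) if ... msg.get("role") == "system"]
def pvSysIdx (xs : List (List (String × String))) (s : Int) : List Int :=
  (PySem.List.enumerate xs s).filterMap (fun p => if pvIsSys p.2 then some p.1 else none)

def remove_system_content (contents : List (List (String × String))) (contexts_memory_len : Int) : List (List (String × String)) :=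
  -- isinstance(contents, list) is always true under the type convention
  if contexts_memory_len < 0 then contents
  else
    let system_message_indices := pvSysIdx contents 0
    let num_system_messages : Int := system_message_indices.length
    let indices_to_remove : PySem.Set Int :=
      if num_system_messages > contexts_memory_len then
        PySem.Set.ofList (PySem.List.slice system_message_indices none (some (num_system_messages - contexts_memory_len)))
      else PySem.Set.empty
    (PySem.List.enumerate contents 0).filterMap
      (fun p => if p.1 ∈ indices_to_remove then none else some p.2)

-- ===== PORT B =====
-- the loop over reversed(contents): keep a system message only while kept < limit
def pvRevKeep (limit : Int) : List (List (String × String)) → Int → List (List (String × String))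
  | [], _ => []
  | m :: rest, kept =>
    if pvIsSys m then
      if kept < limit then m :: pvRevKeep limit rest (kept + 1)
      else pvRevKeep limit rest kept
    else m :: pvRevKeep limit rest kept

def remove_system_content_alt (contents : List (List (String × String))) (contexts_memory_len : Int) : List (List (String × String)) :=
  if contexts_memory_len < 0 then contents
  else (pvRevKeep contexts_memory_len contents.reverse 0).reverse

-- ===== PRECONDITION & SPEC =====
def Spec_remove_system_content (contents : List (List (String × String))) (contexts_memory_len : Int) (out : List (List (String × String))) : Prop := out = remove_system_content_alt contents contexts_memory_len
instance (contents : List (List (String × String))) (contexts_memory_len : Int) (out : List (List (String × String))) : Decidable (Spec_remove_system_content contents contexts_memory_len out) := by unfold Spec_remove_system_content; infer_instance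

-- ===== CLAIM =====
def Claim_equal_remove_system_content : Prop := ∀ (contents : List (List (String × String))) (contexts_memory_len : Int), Dom_remove_system_content contents contexts_memory_len → Spec_remove_system_content contents contexts_memory_len (remove_system_content contents contexts_memory_len)

-- ===== LEMMAS AND PROOFS =====

-- proof-side helper: drop the first k system messages of a forward list
def pvDropSys : List (List (String × String)) → Int → List (List (String × String))
  | [], _ => []
  | m :: rest, k =>
    if 0 < k ∧ pvIsSys m = true then pvDropSys rest (k - 1)
    else m :: pvDropSys rest k

lemma pvSysIdx_nil (s : Int) : pvSysIdx [] s = [] := rfl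

lemma pvSysIdx_cons (m : List (String × String)) (rest : List (List (String × String))) (s : Int) :
    pvSysIdx (m :: rest) s =
      if pvIsSys m then s :: pvSysIdx rest (s + 1) else pvSysIdx rest (s + 1) := by
  unfold pvSysIdx
  rw [PySem.List.enumerate_cons, List.filterMap_cons]
  by_cases h : pvIsSys m <;> simp [h]

lemma pvSysIdx_ge (xs : List (List (String × String))) (s : Int) :
    ∀ i ∈ pvSysIdx xs s, s ≤ i := by
  induction xs generalizing s with
  | nil => simp [pvSysIdx_nil]
  | cons m rest ih =>
    intro i hi
    rw [pvSysIdx_cons] at hi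
    split at hi
    · rcases List.mem_cons.mp hi with h | h
      · omega
      · have := ih (s + 1) i h; omega
    · have := ih (s + 1) i hi; omega

lemma pvSysIdx_length (xs : List (List (String × String))) (s : Int) :
    (pvSysIdx xs s).length = xs.countP (fun m => pvIsSys m) := by
  induction xs generalizing s with
  | nil => simp [pvSysIdx_nil]
  | cons m rest ih =>
    rw [pvSysIdx_cons, List.countP_cons]
    by_cases h : pvIsSys m <;> simp [h, ih]

lemma pvEnum_fst_ge (xs : List (List (String × String))) (s : Int) :
    ∀ p ∈ PySem.List.enumerate xs s, s ≤ p.1 := by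
  induction xs generalizing s with
  | nil => simp [PySem.List.enumerate_nil]
  | cons m rest ih =>
    intro p hp
    rw [PySem.List.enumerate_cons] at hp
    rcases List.mem_cons.mp hp with h | h
    · subst h; simp
    · have := ih (s + 1) p h; omega

lemma pvDropSys_cons (m : List (String × String)) (rest : List (List (String × String))) (k : Int) :
    pvDropSys (m :: rest) k =
      if 0 < k ∧ pvIsSys m = true then pvDropSys rest (k - 1) else m :: pvDropSys rest k := rfl

lemma pvDropSys_zero (xs : List (List (String × String))) : pvDropSys xs 0 = xs := by
  induction xs with
  | nil => rfl
  | cons m rest ih =>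
    rw [pvDropSys_cons, if_neg (by simp), ih]

-- Core A-side: filtering out the first r system indices equals the skip-counter helper.
lemma pvCore (xs : List (List (String × String))) (s : Int) (r : Nat) :
    (PySem.List.enumerate xs s).filterMap
      (fun p => if p.1 ∈ (pvSysIdx xs s).take r then none else some p.2)
    = pvDropSys xs (r : Int) := by
  induction xs generalizing s r with
  | nil => simp [PySem.List.enumerate_nil, pvDropSys]
  | cons m rest ih =>
    rw [PySem.List.enumerate_cons, pvSysIdx_cons]
    by_cases hm : pvIsSys m
    · rw [if_pos hm]
      cases r with
      | zero =>
        have h0 := ih (s + 1) 0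
        rw [List.take_zero] at h0
        rw [List.take_zero, List.filterMap_cons]
        have hhead : (if (s, m).1 ∈ ([] : List Int) then none else some (s, m).2) = some m := by
          simp
        rw [hhead, h0, Nat.cast_zero, pvDropSys_cons, if_neg (by simp)]
      | succ r' =>
        rw [List.take_succ_cons, List.filterMap_cons]
        have hhead : (if (s, m).1 ∈ s :: (pvSysIdx rest (s + 1)).take r' then none else some (s, m).2) = none := by
          simp
        rw [hhead]
        have hcong : (List.filterMap
            (fun p => if p.1 ∈ s :: (pvSysIdx rest (s + 1)).take r' then none else some p.2)
            (PySem.List.enumerate rest (s + 1)))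
            = List.filterMap
            (fun p => if p.1 ∈ (pvSysIdx rest (s + 1)).take r' then none else some p.2)
            (PySem.List.enumerate rest (s + 1)) := by
          apply List.filterMap_congr
          intro p hp
          have hge := pvEnum_fst_ge rest (s + 1) p hp
          have hne : p.1 ≠ s := by omega
          simp [hne]
        rw [hcong, ih (s + 1) r']
        rw [pvDropSys_cons, if_pos ⟨by push_cast; omega, hm⟩]
        have hcast : ((r' + 1 : Nat) : Int) - 1 = (r' : Int) := by push_cast; ring
        rw [hcast]
    · rw [if_neg hm, List.filterMap_cons]
      have hs : s ∉ (pvSysIdx rest (s + 1)).take r := by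
        intro h
        have := pvSysIdx_ge rest (s + 1) s (List.mem_of_mem_take h)
        omega
      have hhead : (if (s, m).1 ∈ (pvSysIdx rest (s + 1)).take r then none else some (s, m).2) = some m := by
        simp [hs]
      rw [hhead, ih (s + 1) r]
      rw [pvDropSys_cons, if_neg (by intro h; exact hm h.2)]

-- A equals the skip-counter helper.
lemma pvA_eq_drop (contents : List (List (String × String))) (k : Int) (hk : 0 ≤ k) :
    remove_system_content contents k
      = pvDropSys contents (max 0 ((contents.countP (fun m => pvIsSys m) : Int) - k)) := by
  unfold remove_system_content
  rw [if_neg (by omega)]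
  have hcount : contents.countP (fun m => pvIsSys m) = (pvSysIdx contents 0).length :=
    (pvSysIdx_length contents 0).symm
  by_cases hgt : ((pvSysIdx contents 0).length : Int) > k
  · simp only [gt_iff_lt]
    rw [if_pos hgt]
    have hle : (0:Int) ≤ ((pvSysIdx contents 0).length : Int) - k := by omega
    rw [PySem.List.slice_to (pvSysIdx contents 0) hle]
    have hmax : max 0 ((contents.countP (fun m => pvIsSys m) : Int) - k)
        = (((((pvSysIdx contents 0).length : Int)) - k).toNat : Int) := by
      rw [hcount]; omega
    rw [hmax, ← pvCore contents 0 ((((pvSysIdx contents 0).length : Int) - k).toNat)]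
    apply List.filterMap_congr
    intro p _
    have hiff : p.1 ∈ PySem.Set.ofList ((pvSysIdx contents 0).take (((pvSysIdx contents 0).length : Int) - k).toNat)
        ↔ p.1 ∈ (pvSysIdx contents 0).take (((pvSysIdx contents 0).length : Int) - k).toNat := by
      simp [pysem]
    by_cases hmem : p.1 ∈ (pvSysIdx contents 0).take (((pvSysIdx contents 0).length : Int) - k).toNat
    · rw [if_pos (hiff.mpr hmem), if_pos hmem]
    · rw [if_neg (fun h => hmem (hiff.mp h)), if_neg hmem]
  · simp only [gt_iff_lt]
    rw [if_neg hgt]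
    have hmax : max 0 ((contents.countP (fun m => pvIsSys m) : Int) - k) = 0 := by
      rw [hcount]; omega
    rw [hmax, pvDropSys_zero]
    calc (PySem.List.enumerate contents 0).filterMap
          (fun p => if p.1 ∈ (PySem.Set.empty : PySem.Set Int) then none else some p.2)
        = (PySem.List.enumerate contents 0).filterMap (fun p => some p.2) := by
          apply List.filterMap_congr
          intro p _
          rw [if_neg (by simp [PySem.Set.empty])]
      _ = contents := by
          simp [PySem.List.map_snd_enumerate]

-- pvRevKeep on a snoc: the last element is kept unless it is system and the budget is exhausted by ys.
lemma pvRevKeep_snoc (limit : Int) (ys : List (List (String × String))) (m : List (String × String)) (kept : Int) :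
    pvRevKeep limit (ys ++ [m]) kept =
      pvRevKeep limit ys kept ++
        (if pvIsSys m = true ∧ limit ≤ kept + (ys.countP (fun x => pvIsSys x) : Int) then [] else [m]) := by
  induction ys generalizing kept with
  | nil =>
    simp only [List.nil_append, List.countP_nil, Nat.cast_zero, add_zero]
    show pvRevKeep limit [m] kept = _
    simp only [pvRevKeep]
    split_ifs <;> simp_all <;> omega
  | cons y ys' ih =>
    rw [List.cons_append]
    show pvRevKeep limit (y :: (ys' ++ [m])) kept = pvRevKeep limit (y :: ys') kept ++ _
    simp only [pvRevKeep, List.countP_cons, ih]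
    split_ifs <;> simp_all <;> omega

-- B's backward pass equals the skip-counter helper.
lemma pvB_eq_drop (contents : List (List (String × String))) (k : Int) (hk : 0 ≤ k) :
    (pvRevKeep k contents.reverse 0).reverse
      = pvDropSys contents (max 0 ((contents.countP (fun m => pvIsSys m) : Int) - k)) := by
  induction contents with
  | nil => rfl
  | cons m rest ih =>
    rw [List.reverse_cons, pvRevKeep_snoc, List.countP_reverse, List.countP_cons, pvDropSys_cons]
    set c : Nat := rest.countP (fun x => pvIsSys x) with hc
    by_cases hm : pvIsSys m = true
    · rw [if_pos hm]
      by_cases hlt : (0:Int) + (c : Int) < k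
      · -- budget not exhausted: m is kept; the A-side skip counter is 0 on the head
        rw [if_neg (by rintro ⟨-, h2⟩; omega)]
        rw [if_neg (by rintro ⟨h1, -⟩; omega)]
        rw [List.reverse_append, List.reverse_singleton, List.singleton_append]
        have hmax : max 0 (((c + 1 : Nat) : Int) - k) = max 0 ((c : Int) - k) := by
          push_cast; omega
        rw [ih, hmax]
      · -- budget exhausted: m is dropped; the A side skips the head and decrements
        rw [if_pos ⟨hm, by omega⟩]
        rw [if_pos ⟨by push_cast; omega, hm⟩]
        have hmax : max 0 (((c + 1 : Nat) : Int) - k) - 1 = max 0 ((c : Int) - k) := by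
          push_cast; omega
        rw [List.append_nil, hmax]
        exact ih
    · -- not a system message: always kept
      rw [if_neg hm]
      rw [if_neg (by rintro ⟨h1, -⟩; exact hm h1)]
      rw [if_neg (by rintro ⟨-, h2⟩; exact hm h2)]
      rw [List.reverse_append, List.reverse_singleton, List.singleton_append]
      have hmax : max 0 (((c + 0 : Nat) : Int) - k) = max 0 ((c : Int) - k) := by
        push_cast; omega
      rw [ih, hmax]

theorem pv_main (contents : List (List (String × String))) (k : Int) :
    remove_system_content contents k = remove_system_content_alt contents k := by
  by_cases hneg : k < 0
  · unfold remove_system_content remove_system_content_alt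
    simp [hneg]
  · have hk : 0 ≤ k := by omega
    rw [pvA_eq_drop contents k hk]
    unfold remove_system_content_alt
    rw [if_neg hneg, pvB_eq_drop contents k hk]

-- ===== VERDICT =====
theorem remove_system_content_spec : Claim_equal_remove_system_content := by
  intro contents k _
  unfold Spec_remove_system_content
  exact pv_main contents k
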